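-- pv_equiv track=rewrite | github.com/DataMining-Nhom2/MMD-G2 | src/rebaseline.py | _ablation_columns
-- ===== SOURCE A (Python) =====
-- def _ablation_columns(all_columns: list[str]) -> dict[str, list[str]]:
--     """Sinh tập cột cho ablation: tabular-only, tabular+sequence, all."""
--     non_target = [c for c in all_columns if c != "ModelBand"]
--
--     move_cols = [
--         c
--         for c in non_target
--         if c.startswith("svd_")
--         or c
--         in {
--             "move_entropy",
--             "has_castles_ks",
--             "has_castles_qs",
--             "check_count_15ply",
--             "pawn_push_ratio",
--             "first_move_e4",
--             "first_move_d4",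
--             "first_move_Nf3",
--             "first_move_c4",
--             "first_move_other",
--         }
--     ]
--     tabular_cols = [c for c in non_target if c not in move_cols]
--
--     return {
--         "tabular_only": tabular_cols,
--         "tabular_plus_sequence": tabular_cols + move_cols,
--         "all_features": non_target,
--     }
-- ===== SOURCE B (Python) =====
-- MOVE_NAME_SET = {
--     "move_entropy",
--     "has_castles_ks",
--     "has_castles_qs",
--     "check_count_15ply",
--     "pawn_push_ratio",
--     "first_move_e4",
--     "first_move_d4",
--     "first_move_Nf3",
--     "first_move_c4",
--     "first_move_other",
-- }
--
--
-- def _is_move(c: str) -> bool: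
--     return c.startswith("svd_") or c in MOVE_NAME_SET
--
--
-- def _ablation_columns(all_columns: list[str]) -> dict[str, list[str]]:
--     """Stable sort by the boolean move predicate: tabular columns first, move
--     columns last; tabular_only is then a prefix slice of that sorted list."""
--     non_target = [c for c in all_columns if c != "ModelBand"]
--     combined = sorted(non_target, key=_is_move)
--     n_tabular = sum(1 for c in non_target if not _is_move(c))
--     return {
--         "tabular_only": combined[:n_tabular],
--         "tabular_plus_sequence": combined,
--         "all_features": non_target,
--     }
-- ===== Notes on version B (the rewrite author's own statement) =====
-- stated objective: alternative
-- what changed: Replaces A's partition-by-membership-rescan (move_cols comprehension plus a 'c not in move_cols' linear rescan for tabular_cols) with a stable sort of the non-target columns keyed by the boolean move predicate, so tabular_plus_sequence is the sorted list and tabular_only a counted prefix slice of it.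
import Mathlib
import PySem

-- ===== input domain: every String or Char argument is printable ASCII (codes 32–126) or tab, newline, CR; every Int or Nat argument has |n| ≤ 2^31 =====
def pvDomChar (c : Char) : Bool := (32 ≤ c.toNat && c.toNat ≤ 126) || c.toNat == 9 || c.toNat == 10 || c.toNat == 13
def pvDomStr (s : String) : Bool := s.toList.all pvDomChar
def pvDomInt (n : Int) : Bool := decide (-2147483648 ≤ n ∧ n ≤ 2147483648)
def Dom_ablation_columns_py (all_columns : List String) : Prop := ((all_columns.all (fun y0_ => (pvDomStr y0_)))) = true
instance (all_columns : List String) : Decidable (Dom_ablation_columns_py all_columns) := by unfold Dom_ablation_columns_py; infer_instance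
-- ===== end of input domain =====

-- B replaces A's membership-rescan partition by a stable sort on the boolean move predicate plus a prefix slice (alternative algorithm, same value).

-- ===== PORT A =====
def pvMoveNames : List String :=
  ["move_entropy", "has_castles_ks", "has_castles_qs", "check_count_15ply",
   "pawn_push_ratio", "first_move_e4", "first_move_d4", "first_move_Nf3",
   "first_move_c4", "first_move_other"]

def ablation_columns_py (all_columns : List String) : List (String × List String) :=
  let non_target := all_columns.filter (fun c => c != "ModelBand")
  let move_cols := non_target.filter
    (fun c => PySem.Str.startswith c "svd_" || pvMoveNames.contains c)
  let tabular_cols := non_target.filter (fun c => !(move_cols.contains c))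
  [("tabular_only", tabular_cols),
   ("tabular_plus_sequence", tabular_cols ++ move_cols),
   ("all_features", non_target)]

-- ===== PORT B =====
def pvIsMove (c : String) : Bool :=
  PySem.Str.startswith c "svd_" || pvMoveNames.contains c

def ablation_columns_py_alt (all_columns : List String) : List (String × List String) :=
  let non_target := all_columns.filter (fun c => c != "ModelBand")
  -- sorted(non_target, key=_is_move): Python bools sort as 0/1
  let combined := PySem.List.sorted non_target (fun c => if pvIsMove c then (1 : Nat) else 0)
  -- sum(1 for c in non_target if not _is_move(c))
  let n_tabular : Int := non_target.foldl (fun acc c => if !pvIsMove c then acc + 1 else acc) 0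
  [("tabular_only", PySem.List.slice combined none (some n_tabular)),
   ("tabular_plus_sequence", combined),
   ("all_features", non_target)]

-- ===== PRECONDITION & SPEC =====
def Spec_ablation_columns_py (all_columns : List String) (out : List (String × List String)) : Prop := out = ablation_columns_py_alt all_columns
instance (all_columns : List String) (out : List (String × List String)) : Decidable (Spec_ablation_columns_py all_columns out) := by unfold Spec_ablation_columns_py; infer_instance

-- ===== CLAIM =====
def Claim_equal_ablation_columns_py : Prop := ∀ (all_columns : List String), Dom_ablation_columns_py all_columns → Spec_ablation_columns_py all_columns (ablation_columns_py all_columns)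

-- ===== LEMMAS AND PROOFS =====

-- Inserting into a list split as (all-tabular) ++ (all-move) keeps the split, stably.
theorem pv_insert_split (x : String) (t m : List String)
    (ht : ∀ y ∈ t, pvIsMove y = false) (hm : ∀ y ∈ m, pvIsMove y = true) :
    PySem.List.insertBy
      (fun a b => decide ((if pvIsMove a then (1 : Nat) else 0) < (if pvIsMove b then (1 : Nat) else 0)))
      x (t ++ m)
    = if pvIsMove x then t ++ (m ++ [x]) else (t ++ [x]) ++ m := by
  by_cases hx : pvIsMove x = true
  · rw [hx]
    simp only [if_pos trivial]
    rw [← List.append_assoc, PySem.List.insertBy_of_forall_not_before]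
    intro y hy
    rcases List.mem_append.mp hy with h | h
    · simp [ht y h, hx]
    · simp [hm y h, hx]
  · simp only [Bool.not_eq_true] at hx
    rw [hx]
    simp only [Bool.false_eq_true, if_false]
    induction t with
    | nil =>
      simp only [List.nil_append]
      cases m with
      | nil => simp [PySem.List.insertBy]
      | cons y ys =>
        have hy := hm y (by simp)
        simp [PySem.List.insertBy, hy, hx]
    | cons z zs ih =>
      have hz := ht z (by simp)
      simp only [List.cons_append, PySem.List.insertBy, hz, hx]
      rw [if_neg (by simp)]
      rw [ih (fun y hy => ht y (List.mem_cons_of_mem _ hy))]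

-- Folding stable insertion over l from a split accumulator yields the partition.
theorem pv_foldl_insert (l t m : List String)
    (ht : ∀ y ∈ t, pvIsMove y = false) (hm : ∀ y ∈ m, pvIsMove y = true) :
    l.foldl (fun acc x => PySem.List.insertBy
      (fun a b => decide ((if pvIsMove a then (1 : Nat) else 0) < (if pvIsMove b then (1 : Nat) else 0)))
      x acc) (t ++ m)
    = (t ++ l.filter (fun c => !pvIsMove c)) ++ (m ++ l.filter pvIsMove) := by
  induction l generalizing t m with
  | nil => simp
  | cons c l ih =>
    simp only [List.foldl_cons]
    rw [pv_insert_split c t m ht hm]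
    by_cases hc : pvIsMove c = true
    · rw [if_pos hc]
      rw [ih t (m ++ [c]) ht (by intro y hy; rcases List.mem_append.mp hy with h | h
                                 · exact hm y h
                                 · simp at h; subst h; exact hc)]
      simp [hc]
    · simp only [Bool.not_eq_true] at hc
      rw [hc]
      simp only [Bool.false_eq_true, if_false]
      rw [ih (t ++ [c]) m (by intro y hy; rcases List.mem_append.mp hy with h | h
                              · exact ht y h
                              · simp at h; subst h; exact hc) hm]
      simp [hc]

-- The stable sort by the 0/1 move key is exactly the partition.
theorem pv_sorted_partition (l : List String) :
    PySem.List.sorted l (fun c => if pvIsMove c then (1 : Nat) else 0)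
    = l.filter (fun c => !pvIsMove c) ++ l.filter pvIsMove := by
  rw [PySem.List.sorted_eq_foldl_insertBy]
  have := pv_foldl_insert l [] [] (by simp) (by simp)
  simpa using this

-- The counting fold is the length of the tabular filter.
theorem pv_foldl_count (l : List String) (acc : Int) :
    l.foldl (fun acc c => if !pvIsMove c then acc + 1 else acc) acc
    = acc + ((l.filter (fun c => !pvIsMove c)).length : Int) := by
  induction l generalizing acc with
  | nil => simp
  | cons c l ih =>
    by_cases hc : pvIsMove c = true
    · simp only [List.foldl_cons, hc, Bool.not_true, Bool.false_eq_true, if_false,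
        List.filter_cons, Bool.not_true]
      exact ih acc
    · simp only [Bool.not_eq_true] at hc
      simp only [List.foldl_cons, hc, Bool.not_false, if_true, List.filter_cons, Bool.not_false]
      rw [ih (acc + 1)]
      simp only [List.length_cons]
      push_cast
      ring

-- A's 'c not in move_cols' rescan is the complement filter.
theorem pv_contains_filter (p : String → Bool) (l : List String) (c : String)
    (h : c ∈ l) : (l.filter p).contains c = p c := by
  by_cases hp : p c = true
  · rw [hp]
    simp [List.mem_filter, h, hp]
  · simp only [Bool.not_eq_true] at hp
    rw [hp]
    simp only [List.contains_iff_exists_mem_beq, Bool.eq_false_iff, ne_eq, not_exists, not_and]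
    intro x hx
    have := (List.mem_filter.mp hx).2
    intro hbeq
    have : c = x := by simpa using hbeq
    subst this
    simp [List.mem_filter, hp] at hx

-- ===== VERDICT =====
theorem ablation_columns_py_spec : Claim_equal_ablation_columns_py := by
  intro all_columns _
  unfold Spec_ablation_columns_py ablation_columns_py ablation_columns_py_alt
  simp only
  set nt := all_columns.filter (fun c => c != "ModelBand") with hnt
  have hcong : nt.filter
      (fun c => !((nt.filter (fun c => PySem.Str.startswith c "svd_" || pvMoveNames.contains c)).contains c))
    = nt.filter (fun c => !pvIsMove c) := by
    apply List.filter_congr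
    intro c hc
    rw [pv_contains_filter _ _ _ hc]
    simp [pvIsMove]
  have hmv : nt.filter (fun c => PySem.Str.startswith c "svd_" || pvMoveNames.contains c)
      = nt.filter pvIsMove := by
    apply List.filter_congr; intro c _; simp [pvIsMove]
  rw [hcong, hmv, pv_sorted_partition, pv_foldl_count]
  simp only [Int.zero_add]
  rw [PySem.List.slice_to_natCast, List.take_left]
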